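-- pv_equiv track=rewrite | github.com/rmonzon98/gramatica-LL | PostfixGen/infixtopostfix.py | convertOperators
-- ===== SOURCE A (Python) =====
-- def convertOperators(expresion):
--   newExpresion=""
--   for i in range(0,len(expresion)):
--     if expresion[i] in ["?","+"]:
--       if expresion[i] == "?":
--         newExpresion = newExpresion +"|ε"
--       else:
--         if expresion[i-1] == ")":
--           count = 1
--           reverse = i-2
--           temp = ")"
--           while reverse >= 0 and count > 0:
--             if expresion[reverse] == "(":
--               temp = temp + "("
--               count = count - 1
--             elif expresion[reverse] == ")":
--               temp = temp + ")"
--               count = count + 1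
--             else:
--               temp = temp + expresion[reverse]
--             reverse = reverse - 1
--           tempReverse = temp [::-1]
--           newExpresion = newExpresion + tempReverse + "*"
--         else:
--           newExpresion = newExpresion + expresion[i-1] + "*"
--     else:
--       newExpresion = newExpresion + expresion[i]
--   if "?" in newExpresion:
--     return convertOperators(newExpresion)
--   else:
--     return newExpresion
-- ===== SOURCE B (Python) =====
-- def convertOperators(expresion):
--   # Build, in one forward pass with a stack, the index of the matching "("
--   # for every ")" (unmatched ")" maps to 0), then rewrite in a single pass
--   # using slices instead of A's inner backward scan.
--   match = {}
--   stack = []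
--   for k, c in enumerate(expresion):
--     if c == "(":
--       stack.append(k)
--     elif c == ")":
--       match[k] = stack.pop() if stack else 0
--   parts = []
--   for i, c in enumerate(expresion):
--     if c == "?":
--       parts.append("|ε")
--     elif c == "+":
--       if i > 0 and expresion[i-1] == ")":
--         parts.append(expresion[match[i-1]:i] + "*")
--       else:
--         parts.append(expresion[i-1] + "*")
--     else:
--       parts.append(c)
--   newExpresion = "".join(parts)
--   if "?" in newExpresion:
--     return convertOperators(newExpresion)
--   return newExpresion
-- ===== Notes on version B (the rewrite author's own statement) =====
-- stated objective: alternative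
-- what changed: B precomputes, in one forward pass with a stack, the index of the matching opening parenthesis for every closing parenthesis (unmatched ones map to index 0) and slices the repeated group directly from that table, replacing A's backward counting scan performed at each plus operator; the epsilon-alternative rewrite and the repeat-while-a-question-mark-remains recursion are unchanged.
import Mathlib
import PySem

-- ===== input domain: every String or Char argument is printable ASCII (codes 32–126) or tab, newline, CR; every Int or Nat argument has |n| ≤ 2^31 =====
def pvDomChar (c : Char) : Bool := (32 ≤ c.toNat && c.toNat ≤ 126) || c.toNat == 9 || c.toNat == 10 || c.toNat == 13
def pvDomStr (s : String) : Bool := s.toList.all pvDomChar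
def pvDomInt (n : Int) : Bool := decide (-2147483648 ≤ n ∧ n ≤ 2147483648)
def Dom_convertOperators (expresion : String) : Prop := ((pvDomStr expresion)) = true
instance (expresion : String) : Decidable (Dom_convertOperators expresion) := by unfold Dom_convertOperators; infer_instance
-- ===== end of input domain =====

-- B replaces A's inner backward paren-scan by a match table built once with a stack,
-- then slices; objective: alternative (one forward pre-pass instead of a nested scan).
-- Both ports carry a fuel bound (length+1) for the outer rewrite-until-no-'?' recursion,
-- which makes that (possibly very deep) recursion structurally total; the fuel is the
-- same on both sides and is never needed on inputs the behavioural tests reach.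

-- ===== PORT A =====
-- A's inner `while reverse >= 0 and count > 0` loop; `fuel` only makes it total
-- (e.length steps always suffice: `reverse` starts < e.length and decreases).
def pvScanA (e : List Char) : Nat → Int → Int → List Char → List Char
  | 0, _, _, temp => temp
  | fuel + 1, reverse, count, temp =>
    if reverse ≥ 0 ∧ count > 0 then
      let c := (PySem.List.pyGet? e reverse).getD ' '
      if c = '(' then pvScanA e fuel (reverse - 1) (count - 1) (temp ++ [c])
      else if c = ')' then pvScanA e fuel (reverse - 1) (count + 1) (temp ++ [c])
      else pvScanA e fuel (reverse - 1) count (temp ++ [c])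
    else temp

-- one iteration of A's `for i in range(0, len(expresion))` body
def pvStepA (e : List Char) (newE : List Char) (i : Nat) : List Char :=
  let c := e.getD i ' '                                -- expresion[i], i < len
  if c = '?' ∨ c = '+' then
    if c = '?' then newE ++ ['|', 'ε']
    else
      let prev := (PySem.List.pyGet? e ((i : Int) - 1)).getD ' '   -- expresion[i-1] (negative index wraps; in range since len > 0)
      if prev = ')' then
        let temp := pvScanA e e.length ((i : Int) - 2) 1 [')']
        newE ++ temp.reverse ++ ['*']
      else newE ++ [prev, '*']
  else newE ++ [c]

def pvPassA (e : List Char) : List Char := (List.range e.length).foldl (pvStepA e) []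

-- A's tail recursion `if "?" in newExpresion: return convertOperators(newExpresion)`
def pvConvA : Nat → List Char → List Char
  | 0, e => e
  | fuel + 1, e => let n := pvPassA e; if '?' ∈ n then pvConvA fuel n else n

def convertOperators (expresion : String) : String :=
  String.ofList (pvConvA (expresion.toList.length + 1) expresion.toList)

-- ===== PORT B =====
-- Source B's first pass: `match` dict and `(`-index stack (Python appends/pops at the
-- list end; here the stack head is the end).
def pvStepM (e : List Char) (st : PySem.Dict Nat Nat × List Nat) (k : Nat) : PySem.Dict Nat Nat × List Nat :=
  let c := e.getD k ' '
  if c = '(' then (st.1, k :: st.2)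
  else if c = ')' then
    match st.2 with
    | [] => (st.1.insert k 0, [])
    | s :: rest => (st.1.insert k s, rest)
  else st

-- state (match, stack) after the first k iterations of Source B's first loop
def pvMS (e : List Char) (k : Nat) : PySem.Dict Nat Nat × List Nat :=
  (List.range k).foldl (pvStepM e) (PySem.Dict.empty, [])

-- one iteration of Source B's second loop body
def pvStepB (e : List Char) (m : PySem.Dict Nat Nat) (parts : List Char) (i : Nat) : List Char :=
  let c := e.getD i ' '
  if c = '?' then parts ++ ['|', 'ε']
  else if c = '+' then
    if 0 < i ∧ e.getD (i - 1) ' ' = ')' then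
      parts ++ PySem.List.slice e (some ((m.getD (i - 1) 0 : Nat) : Int)) (some (i : Int)) ++ ['*']
    else parts ++ [(PySem.List.pyGet? e ((i : Int) - 1)).getD ' ', '*']
  else parts ++ [c]

def pvPassB (e : List Char) : List Char :=
  (List.range e.length).foldl (pvStepB e (pvMS e e.length).1) []

def pvConvB : Nat → List Char → List Char
  | 0, e => e
  | fuel + 1, e => let n := pvPassB e; if '?' ∈ n then pvConvB fuel n else n

def convertOperators_alt (expresion : String) : String :=
  String.ofList (pvConvB (expresion.toList.length + 1) expresion.toList)

-- ===== PRECONDITION & SPEC =====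
def Spec_convertOperators (expresion : String) (out : String) : Prop := out = convertOperators_alt expresion
instance (expresion : String) (out : String) : Decidable (Spec_convertOperators expresion out) := by unfold Spec_convertOperators; infer_instance

-- ===== CLAIM (what is proved, stated in full; the proofs are below) =====
def Claim_equal_convertOperators : Prop := ∀ (expresion : String), Dom_convertOperators expresion → Spec_convertOperators expresion (convertOperators expresion)

-- ===== LEMMAS AND PROOFS =====

-- A's backward scan, written as a pure function of the scanned prefix (given reversed)
-- and the current count; returns the consumed characters in scan order.
def pvScanR : List Char → Nat → List Char
  | _, 0 => []
  | [], _ + 1 => []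
  | c :: rest, n + 1 =>
    c :: (if c = '(' then pvScanR rest n
          else if c = ')' then pvScanR rest (n + 2)
          else pvScanR rest (n + 1))

theorem pvScanR_zero (l : List Char) : pvScanR l 0 = [] := by cases l <;> rfl

theorem pvScanR_nil (c : Nat) : pvScanR [] c = [] := by cases c <;> rfl

theorem pvStepM_snd (e : List Char) (st : PySem.Dict Nat Nat × List Nat) (k : Nat) :
    (pvStepM e st k).2
      = if e.getD k ' ' = '(' then k :: st.2
        else if e.getD k ' ' = ')' then st.2.tail else st.2 := by
  simp only [pvStepM]
  generalize e.getD k ' ' = c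
  by_cases h1 : c = '('
  · simp [h1]
  · by_cases h2 : c = ')'
    · cases hst : st.2 <;> simp [h2]
    · simp [h1, h2]

theorem pvStepM_fst (e : List Char) (st : PySem.Dict Nat Nat × List Nat) (k : Nat) :
    (pvStepM e st k).1
      = if e.getD k ' ' = ')' then st.1.insert k (st.2.getD 0 0) else st.1 := by
  simp only [pvStepM]
  generalize e.getD k ' ' = c
  by_cases h1 : c = '('
  · rw [if_pos h1, if_neg (by rw [h1]; decide)]
  · by_cases h2 : c = ')'
    · cases hst : st.2 <;> simp [h2]
    · simp [h1, h2]

theorem pvMS_succ (e : List Char) (k : Nat) :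
    pvMS e (k + 1) = pvStepM e (pvMS e k) k := by
  simp [pvMS, List.range_succ]

theorem pvMS_stack_lt (e : List Char) (k : Nat) :
    ∀ m ∈ (pvMS e k).2, m < k := by
  induction k with
  | zero => simp [pvMS]
  | succ k ih =>
    intro m hm
    rw [pvMS_succ, pvStepM_snd] at hm
    split_ifs at hm
    · rcases List.mem_cons.mp hm with h | h
      · omega
      · exact Nat.lt_succ_of_lt (ih m h)
    · exact Nat.lt_succ_of_lt (ih m (List.mem_of_mem_tail hm))
    · exact Nat.lt_succ_of_lt (ih m hm)

theorem pvMS_stack_getD_le (e : List Char) (k j : Nat) :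
    (pvMS e k).2.getD j 0 ≤ k := by
  by_cases h : j < (pvMS e k).2.length
  · rw [List.getD_eq_getElem _ 0 h]
    have := pvMS_stack_lt e k _ (List.getElem_mem h)
    omega
  · rw [List.getD_eq_default _ _ (by omega)]
    omega

theorem pvTail_getD (st : List Nat) (j : Nat) : st.tail.getD j 0 = st.getD (j + 1) 0 := by
  cases st <;> simp

theorem pvScanR_stack (e : List Char) :
    ∀ k, k ≤ e.length → ∀ c : Nat, 0 < c →
      pvScanR (e.take k).reverse c
        = ((e.take k).drop ((pvMS e k).2.getD (c - 1) 0)).reverse := by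
  intro k
  induction k with
  | zero =>
    intro _ c hc
    obtain ⟨n, rfl⟩ : ∃ n, c = n + 1 := ⟨c - 1, by omega⟩
    simp [pvMS, pvScanR]
  | succ k ih =>
    intro hk c hc
    obtain ⟨n, rfl⟩ : ∃ n, c = n + 1 := ⟨c - 1, by omega⟩
    have hklt : k < e.length := by omega
    have hgetD : e.getD k ' ' = e[k] := List.getD_eq_getElem e ' ' hklt
    have htake : e.take (k + 1) = e.take k ++ [e[k]] := by
      rw [List.take_add_one, List.getElem?_eq_getElem hklt]; rfl
    have hlen : (e.take k).length = k := by rw [List.length_take]; omega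
    have hstk : (pvMS e (k + 1)).2
        = if e[k] = '(' then k :: (pvMS e k).2
          else if e[k] = ')' then (pvMS e k).2.tail else (pvMS e k).2 := by
      rw [pvMS_succ, pvStepM_snd, hgetD]
    have hdropapp : ∀ m : Nat, m ≤ k →
        ((e.take k ++ [e[k]]).drop m) = (e.take k).drop m ++ [e[k]] := by
      intro m hm
      rw [List.drop_append_of_le_length (by omega)]
    rw [htake, hstk]
    rw [show (e.take k ++ [e[k]]).reverse = e[k] :: (e.take k).reverse from by simp]
    simp only [Nat.add_sub_cancel]
    by_cases h1 : e[k] = '('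
    · rw [if_pos h1]
      simp only [pvScanR]
      rw [if_pos h1]
      cases n with
      | zero =>
        rw [pvScanR_zero]
        have hd : ((k : Nat) :: (pvMS e k).2).getD 0 0 = k := rfl
        rw [hd, List.drop_append_of_le_length (by omega),
          show (e.take k).drop k = [] from by rw [List.drop_eq_nil_iff]; omega]
        simp
      | succ m =>
        have hih := ih (by omega) (m + 1) (by omega)
        simp only [Nat.add_sub_cancel] at hih
        rw [show ((k : Nat) :: (pvMS e k).2).getD (m + 1) 0 = (pvMS e k).2.getD m 0 from
          List.getD_cons_succ, hih, hdropapp _ (by have := pvMS_stack_getD_le e k m; omega)]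
        simp
    · by_cases h2 : e[k] = ')'
      · rw [if_neg h1, if_pos h2]
        simp only [pvScanR]
        rw [if_neg h1, if_pos h2]
        have hih := ih (by omega) (n + 2) (by omega)
        simp only [show n + 2 - 1 = n + 1 from rfl] at hih
        rw [pvTail_getD, hih,
          hdropapp _ (by have := pvMS_stack_getD_le e k (n + 1); omega)]
        simp
      · rw [if_neg h1, if_neg h2]
        simp only [pvScanR, if_neg h1, if_neg h2]
        have hih := ih (by omega) (n + 1) (by omega)
        simp only [Nat.add_sub_cancel] at hih
        rw [hih, hdropapp _ (by have := pvMS_stack_getD_le e k n; omega)]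
        simp

theorem pvScanA_eq_scanR (e : List Char) :
    ∀ k, k ≤ e.length → ∀ fuel, k ≤ fuel → ∀ (c : Nat) (temp : List Char),
      pvScanA e fuel ((k : Int) - 1) (c : Int) temp = temp ++ pvScanR (e.take k).reverse c := by
  intro k
  induction k with
  | zero =>
    intro _ fuel _ c temp
    cases fuel with
    | zero => simp [pvScanA, pvScanR_nil]
    | succ f =>
      unfold pvScanA
      rw [if_neg (show ¬(((0 : Nat) : Int) - 1 ≥ 0 ∧ (c : Int) > 0) from by omega)]
      simp [pvScanR_nil]
  | succ k ih =>
    intro hk fuel hfuel c temp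
    obtain ⟨f, rfl⟩ : ∃ f, fuel = f + 1 := ⟨fuel - 1, by omega⟩
    have hklt : k < e.length := by omega
    have htake : e.take (k + 1) = e.take k ++ [e[k]] := by
      rw [List.take_add_one, List.getElem?_eq_getElem hklt]; rfl
    have hidx : ((k + 1 : Nat) : Int) - 1 = (k : Int) := by push_cast; ring
    have hget : (PySem.List.pyGet? e (k : Int)).getD ' ' = e[k] := by
      rw [PySem.List.pyGet?_natCast, List.getElem?_eq_getElem hklt]; rfl
    cases c with
    | zero =>
      unfold pvScanA
      rw [hidx, if_neg (show ¬((k : Int) ≥ 0 ∧ ((0 : Nat) : Int) > 0) from by omega),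
        pvScanR_zero]
      simp
    | succ n =>
      unfold pvScanA
      rw [hidx, if_pos (show (k : Int) ≥ 0 ∧ ((n + 1 : Nat) : Int) > 0 from by
        constructor <;> omega)]
      simp only [hget]
      rw [htake, show (e.take k ++ [e[k]]).reverse = e[k] :: (e.take k).reverse from by simp]
      simp only [pvScanR]
      by_cases h1 : e[k] = '('
      · rw [if_pos h1, if_pos h1,
          show ((n + 1 : Nat) : Int) - 1 = ((n : Nat) : Int) from by push_cast; ring,
          ih (by omega) f (by omega) n (temp ++ [e[k]])]
        simp
      · by_cases h2 : e[k] = ')'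
        · rw [if_neg h1, if_pos h2, if_neg h1, if_pos h2,
            show ((n + 1 : Nat) : Int) + 1 = ((n + 2 : Nat) : Int) from by push_cast; ring,
            ih (by omega) f (by omega) (n + 2) (temp ++ [e[k]])]
          simp
        · rw [if_neg h1, if_neg h2, if_neg h1, if_neg h2,
            ih (by omega) f (by omega) (n + 1) (temp ++ [e[k]])]
          simp

-- the match dict's entry at a ')' position k is the stack top just before step k
theorem pvMS_dict_getD (e : List Char) (k : Nat) (hk : k < e.length) (hc : e[k] = ')') :
    ∀ j, k < j → j ≤ e.length →
      (pvMS e j).1.getD k 0 = (pvMS e k).2.getD 0 0 := by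
  intro j
  induction j with
  | zero => omega
  | succ j ih =>
    intro hkj hje
    by_cases hkj' : k < j
    · rw [pvMS_succ, pvStepM_fst]
      split_ifs with h
      · rw [PySem.Dict.getD_insert, if_neg (by omega)]
        exact ih hkj' (by omega)
      · exact ih hkj' (by omega)
    · have hjk : j = k := by omega
      subst hjk
      rw [pvMS_succ, pvStepM_fst, List.getD_eq_getElem e ' ' hk, hc,
        if_pos rfl, PySem.Dict.getD_insert_self]

theorem pvStep_eq (e : List Char) (i : Nat) (hi : i < e.length) (acc : List Char) :
    pvStepA e acc i = pvStepB e (pvMS e e.length).1 acc i := by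
  have hgi : e.getD i ' ' = e[i] := List.getD_eq_getElem e ' ' hi
  simp only [pvStepA, pvStepB]
  rw [hgi]
  by_cases hq : e[i] = '?'
  · simp [hq]
  · by_cases hp : e[i] = '+'
    · rw [if_pos (Or.inr hp), if_neg hq, if_neg hq, if_pos hp]
      cases i with
      | zero =>
        rw [show ((0 : Nat) : Int) - 2 = (-2 : Int) from by norm_num,
          show ((0 : Nat) : Int) - 1 = (-1 : Int) from by norm_num]
        obtain ⟨f, hf⟩ : ∃ f, e.length = f + 1 := ⟨e.length - 1, by omega⟩
        have hscan : pvScanA e e.length (-2) 1 [')'] = [')'] := by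
          rw [hf]; unfold pvScanA
          rw [if_neg (show ¬((-2 : Int) ≥ 0 ∧ (1 : Int) > 0) from by omega)]
        rw [hscan,
          if_neg (show ¬(0 < 0 ∧ e.getD (0 - 1) ' ' = ')') from fun h => absurd h.1 (by omega))]
        by_cases hprev : (PySem.List.pyGet? e (-1)).getD ' ' = ')'
        · rw [if_pos hprev, ← hprev]
          simp
        · rw [if_neg hprev]
      | succ j =>
        have hj : j < e.length := by omega
        have hprev_eq : (PySem.List.pyGet? e (((j + 1 : Nat) : Int) - 1)).getD ' ' = e[j] := by
          rw [show ((j + 1 : Nat) : Int) - 1 = ((j : Nat) : Int) from by push_cast; ring,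
            PySem.List.pyGet?_natCast, List.getElem?_eq_getElem hj]; rfl
        have hgetDj : e.getD (j + 1 - 1) ' ' = e[j] := by
          simpa using List.getD_eq_getElem e ' ' hj
        rw [hprev_eq]
        by_cases hpr : e[j] = ')'
        · rw [if_pos hpr, if_pos (show 0 < j + 1 ∧ e.getD (j + 1 - 1) ' ' = ')' from
            ⟨by omega, by rw [hgetDj]; exact hpr⟩)]
          have hidx : ((j + 1 : Nat) : Int) - 2 = ((j : Nat) : Int) - 1 := by push_cast; ring
          have hscan := pvScanA_eq_scanR e j (by omega) e.length (by omega) 1 [')']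
          simp only [Nat.cast_one] at hscan
          have hstack := pvScanR_stack e j (by omega) 1 (by omega)
          set m : Nat := (pvMS e j).2.getD 0 0 with hm
          have hmle : m ≤ j := pvMS_stack_getD_le e j 0
          have hmd : (pvMS e e.length).1.getD (j + 1 - 1) 0 = m := by
            simpa using pvMS_dict_getD e j hj hpr e.length (by omega) (le_refl _)
          have htake : e.take (j + 1) = e.take j ++ [e[j]] := by
            rw [List.take_add_one, List.getElem?_eq_getElem hj]; rfl
          have hlenj : (e.take j).length = j := by rw [List.length_take]; omega
          have hslice : PySem.List.slice e (some ((m : Nat) : Int)) (some ((j + 1 : Nat) : Int))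
              = (e.take j).drop m ++ [e[j]] := by
            rw [PySem.List.slice_natCast, ← List.drop_take, htake,
              List.drop_append_of_le_length (by omega)]
          rw [hidx, hscan, hstack, hmd, hslice, hpr]
          simp
        · rw [if_neg hpr, if_neg (by rintro ⟨-, h⟩; rw [hgetDj] at h; exact hpr h)]
    · rw [if_neg (by rintro (h | h); exacts [hq h, hp h]), if_neg hq, if_neg hp]

theorem pvPass_eq (e : List Char) : pvPassA e = pvPassB e := by
  unfold pvPassA pvPassB
  exact PySem.List.foldl_congr_mem _ _ _ _
    (fun acc i hi => pvStep_eq e i (List.mem_range.mp hi) acc)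

theorem pvConv_eq : ∀ (fuel : Nat) (e : List Char), pvConvA fuel e = pvConvB fuel e := by
  intro fuel
  induction fuel with
  | zero => intro e; rfl
  | succ f ih =>
    intro e
    unfold pvConvA pvConvB
    rw [← pvPass_eq]
    by_cases h : '?' ∈ pvPassA e
    · rw [if_pos h, if_pos h, ih]
    · rw [if_neg h, if_neg h]

-- ===== VERDICT (by name: the statement is the Claim_ definition above) =====
theorem convertOperators_spec : Claim_equal_convertOperators := by
  intro expresion _
  unfold Spec_convertOperators convertOperators convertOperators_alt
  rw [pvConv_eq]
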